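-- pv_equiv track=rewrite | github.com/WesselM/Advent-of-Code | 2020/day_06.py | part_one
-- ===== SOURCE A (Python) =====
-- import string
--
-- def part_one(answers):
--     count_sum = 0
--     questions = string.ascii_lowercase
--     for answer in answers:
--         for question in questions:
--             if question in answer:
--                 count_sum += 1
--
--     return count_sum
-- ===== SOURCE B (Python) =====
-- def part_one(answers):
--     total = 0
--     for answer in answers:
--         mask = 0
--         for ch in answer:
--             if 'a' <= ch <= 'z':
--                 mask |= 1 << (ord(ch) - 97)
--         total += bin(mask).count('1')
--     return total
-- ===== Notes on version B (the rewrite author's own statement) =====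
-- stated objective: alternative
-- what changed: Replaces A's 26 substring-membership tests per answer with a one-pass 26-bit bitmask (OR-ing a bit per lowercase character) whose popcount gives the per-answer distinct-letter count.
import Mathlib
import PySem

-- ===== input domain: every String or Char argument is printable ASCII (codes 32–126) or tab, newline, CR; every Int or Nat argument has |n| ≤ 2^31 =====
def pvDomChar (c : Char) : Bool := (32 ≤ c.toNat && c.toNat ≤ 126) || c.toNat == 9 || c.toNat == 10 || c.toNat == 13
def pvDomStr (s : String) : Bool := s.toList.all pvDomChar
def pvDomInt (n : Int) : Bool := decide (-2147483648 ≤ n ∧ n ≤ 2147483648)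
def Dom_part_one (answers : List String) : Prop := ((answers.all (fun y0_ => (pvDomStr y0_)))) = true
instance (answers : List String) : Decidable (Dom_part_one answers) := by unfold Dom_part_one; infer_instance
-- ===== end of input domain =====

-- B replaces A's 26 substring-membership tests per answer with a one-pass 26-bit bitmask whose popcount is the per-answer count (alternative algorithm, same result).

-- ===== PORT A =====
-- string.ascii_lowercase
def pvAlphabet : List Char := "abcdefghijklmnopqrstuvwxyz".toList

def part_one (answers : List String) : Int :=
  answers.foldl (fun count_sum answer =>
    pvAlphabet.foldl (fun c question =>
      if PySem.Str.isIn (String.ofList [question]) answer then c + 1 else c) count_sum) 0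

-- ===== PORT B =====
-- mask |= 1 << (ord(ch) - 97)  (mask is always a nonnegative int, so Nat is exact here)
def pvStep (m : Nat) (c : Char) : Nat :=
  if 'a' ≤ c ∧ c ≤ 'z' then m ||| (1 <<< (c.toNat - 97)) else m

-- bin(mask).count('1'): sum of the binary digits of a nonnegative int (exact for mask ≥ 0)
def pvPopcount (n : Nat) : Nat :=
  if h : n = 0 then 0 else n % 2 + pvPopcount (n / 2)
decreasing_by exact Nat.div_lt_self (Nat.pos_of_ne_zero h) one_lt_two

def part_one_alt (answers : List String) : Int :=
  answers.foldl (fun total answer =>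
    total + (pvPopcount (answer.toList.foldl pvStep 0) : Int)) 0

-- ===== PRECONDITION & SPEC =====
def Spec_part_one (answers : List String) (out : Int) : Prop := out = part_one_alt answers
instance (answers : List String) (out : Int) : Decidable (Spec_part_one answers out) := by unfold Spec_part_one; infer_instance

-- ===== CLAIM (what is proved, stated in full; the proofs are below) =====
def Claim_equal_part_one : Prop := ∀ (answers : List String), Dom_part_one answers → Spec_part_one answers (part_one answers)

-- ===== LEMMAS AND PROOFS =====

-- character arithmetic helpers
theorem pv_char_le (c d : Char) : (c ≤ d) ↔ c.toNat ≤ d.toNat := by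
  rw [Char.le_def, UInt32.le_iff_toNat_le]; rfl

theorem pv_char_inj (c d : Char) (h : c.toNat = d.toNat) : c = d := by
  apply Char.ext; exact UInt32.toNat_inj.mp h

def pvChar (i : Nat) : Char := Char.ofNat (97 + i)

theorem pv_alphabet_eq : pvAlphabet = (List.range 26).map pvChar := by decide

theorem pv_char_facts : ∀ i, i < 26 →
    ('a' ≤ pvChar i ∧ pvChar i ≤ 'z') ∧ (pvChar i).toNat = 97 + i := by decide

-- A's one-char substring test is list membership
theorem pv_hmem (answer : String) (q : Char) :
    PySem.Str.isIn (String.ofList [q]) answer = decide (q ∈ answer.toList) := by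
  by_cases h : q ∈ answer.toList
  · simp only [PySem.Str.isIn_eq, String.toList_ofList]
    rw [(PySem.Chars.isIn_iff_infix [q] answer.toList).mpr ((List.singleton_infix_iff q answer.toList).mpr h)]
    simp [h]
  · simp only [PySem.Str.isIn_eq, String.toList_ofList]
    rw [(PySem.Chars.isIn_eq_false_iff [q] answer.toList).mpr
          (fun hin => h ((List.singleton_infix_iff q answer.toList).mp hin))]
    simp [h]

-- indicator sum = filter length
theorem pv_sum_indicator {α : Type} (l : List α) (p : α → Bool) :
    (l.map (fun x => if p x then (1 : Int) else 0)).sum = ((l.filter p).length : Int) := by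
  induction l with
  | nil => simp
  | cons a t ih => by_cases h : p a <;> simp [h, ih, Int.add_comm]

-- A's inner loop counts the alphabet letters occurring in the answer
theorem pv_inner_a (answer : String) (acc : Int) :
    pvAlphabet.foldl (fun c question =>
      if PySem.Str.isIn (String.ofList [question]) answer then c + 1 else c) acc
    = acc + ((pvAlphabet.filter (fun q => decide (q ∈ answer.toList))).length : Int) := by
  have hcongr : ∀ (l : List Char) (acc : Int), l.foldl (fun c question =>
      if PySem.Str.isIn (String.ofList [question]) answer then c + 1 else c) acc
      = l.foldl (fun c question =>
        c + (if PySem.Str.isIn (String.ofList [question]) answer then 1 else 0)) acc := by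
    intro l
    induction l with
    | nil => intro acc; rfl
    | cons q t ih =>
        intro acc
        simp only [List.foldl_cons]
        rw [ih]
        congr 1
        split <;> ring
  rw [hcongr, PySem.List.foldl_add, pv_sum_indicator]
  congr 2
  exact congrArg List.length (List.filter_congr (fun q _ => pv_hmem answer q))

-- bits of the mask built by B's inner loop
theorem pv_testBit_fold (l : List Char) : ∀ (m i : Nat),
    (l.foldl pvStep m).testBit i
      = (m.testBit i || l.any (fun c => decide (('a' ≤ c ∧ c ≤ 'z') ∧ c.toNat - 97 = i))) := by
  induction l with
  | nil => intro m i; simp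
  | cons c t ih =>
      intro m i
      simp only [List.foldl_cons, List.any_cons]
      by_cases hc : 'a' ≤ c ∧ c ≤ 'z'
      · simp [pvStep, hc, ih, Nat.testBit_or, Nat.one_shiftLeft, Nat.testBit_two_pow,
          Bool.or_assoc]
      · simp [pvStep, hc, ih]

-- the mask stays below 2^26
theorem pv_mask_lt (l : List Char) : ∀ m, m < 2 ^ 26 → l.foldl pvStep m < 2 ^ 26 := by
  induction l with
  | nil => intro m hm; exact hm
  | cons c t ih =>
      intro m hm
      apply ih
      unfold pvStep
      split
      · rename_i hc
        apply Nat.or_lt_two_pow hm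
        rw [Nat.one_shiftLeft]
        apply Nat.pow_lt_pow_right one_lt_two
        have h1 := (pv_char_le 'a' c).mp hc.1
        have h2 := (pv_char_le c 'z').mp hc.2
        have ha : ('a' : Char).toNat = 97 := by decide
        have hz : ('z' : Char).toNat = 122 := by decide
        omega
      · exact hm

-- popcount counts the set bits below any bound on the number
theorem pv_popcount_range : ∀ (k n : Nat), n < 2 ^ k →
    pvPopcount n = ((List.range k).filter n.testBit).length := by
  intro k
  induction k with
  | zero =>
      intro n hn
      interval_cases n
      simp [pvPopcount]
  | succ k ih =>
      intro n hn
      by_cases h0 : n = 0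
      · subst h0
        have hnil : List.filter (Nat.testBit 0) (List.range (k + 1)) = [] := by
          apply List.filter_eq_nil_iff.mpr
          intro a _
          simp [Nat.zero_testBit]
        rw [hnil, pvPopcount]
        simp
      · rw [pvPopcount, dif_neg h0]
        have hdiv : n / 2 < 2 ^ k := by
          have : 2 ^ (k + 1) = 2 * 2 ^ k := by ring
          omega
        rw [ih (n / 2) hdiv, List.range_succ_eq_map, List.filter_cons]
        have hmap : (List.map Nat.succ (List.range k)).filter n.testBit
            = List.map Nat.succ ((List.range k).filter (n / 2).testBit) := by
          rw [List.filter_map]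
          congr 1
          apply List.filter_congr
          intro i _
          simp [Function.comp, Nat.testBit_add_one]
        rw [hmap]
        by_cases hb : n % 2 = 1
        · simp [Nat.testBit_zero, hb]; omega
        · have h2 : n % 2 = 0 := by omega
          simp [Nat.testBit_zero, h2]

-- per answer: B's popcount equals A's count of present letters
theorem pv_bits (chars : List Char) :
    (pvPopcount (chars.foldl pvStep 0) : Int)
      = ((pvAlphabet.filter (fun q => decide (q ∈ chars))).length : Int) := by
  congr 1
  rw [pv_popcount_range 26 _ (pv_mask_lt chars 0 (by norm_num))]
  rw [pv_alphabet_eq, List.filter_map, List.length_map]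
  congr 1
  apply List.filter_congr
  intro i hi
  have hi26 : i < 26 := List.mem_range.mp hi
  rw [pv_testBit_fold, Nat.zero_testBit, Bool.false_or]
  rw [Bool.eq_iff_iff]
  simp only [List.any_eq_true, decide_eq_true_eq, Function.comp]
  constructor
  · rintro ⟨c, hc, ⟨hlow, hbit⟩⟩
    have h1 := (pv_char_le 'a' c).mp hlow.1
    have ha : ('a' : Char).toNat = 97 := by decide
    have hfacts := pv_char_facts i hi26
    have : c = pvChar i := pv_char_inj c (pvChar i) (by omega)
    rwa [← this]
  · intro hmem
    refine ⟨pvChar i, hmem, (pv_char_facts i hi26).1, ?_⟩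
    have := (pv_char_facts i hi26).2
    omega

theorem pv_main (answers : List String) : part_one answers = part_one_alt answers := by
  unfold part_one part_one_alt
  induction answers using List.reverseRecOn with
  | nil => rfl
  | append_singleton t a ih =>
      rw [List.foldl_append, List.foldl_append]
      simp only [List.foldl_cons, List.foldl_nil]
      rw [pv_inner_a, ih, pv_bits]

-- ===== VERDICT (by name: the statement is the Claim_ definition above) =====
theorem part_one_spec : Claim_equal_part_one := by
  intro answers _
  unfold Spec_part_one
  exact pv_main answers
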